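-- pv_equiv track=rewrite | github.com/OlympusTiger/Advent_of_Code | 2023/solutions/day02.py | part1
-- ===== SOURCE A (Python) =====
-- def part1(id,pulls):
--     rr=12
--     gg=13
--     bb=14
--     for p in pulls:
--         for i in p.split(', '):
--             num,color=i.split()
--             if color=='red':
--                 if int(num)>rr:
--                     return 0
--             elif color =='green':
--                 if int(num)>gg:
--                     return 0
--             elif color=='blue':
--                 if int(num)>bb:
--                     return 0
--
--     return id
-- ===== SOURCE B (Python) =====
-- def part1(id, pulls):
--     # one pass recording the maximum count seen per colour, then a single check at the end
--     r = g = b = 0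
--     for p in pulls:
--         for seg in p.split(', '):
--             num, color = seg.split()
--             if color == 'red':
--                 r = max(r, int(num))
--             elif color == 'green':
--                 g = max(g, int(num))
--             elif color == 'blue':
--                 b = max(b, int(num))
--     return 0 if r > 12 or g > 13 or b > 14 else id
-- ===== Notes on version B (the rewrite author's own statement) =====
-- stated objective: simpler
-- what changed: B replaces A's per-token early-return validation by a build-then-check pass: it records the maximum count seen per colour in one full scan and compares the three maxima against the limits once at the end.
-- outside the precondition, e.g. on part1(5, ['100 red', 'oops']): A returns 0, B raises ValueError
import Mathlib
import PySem

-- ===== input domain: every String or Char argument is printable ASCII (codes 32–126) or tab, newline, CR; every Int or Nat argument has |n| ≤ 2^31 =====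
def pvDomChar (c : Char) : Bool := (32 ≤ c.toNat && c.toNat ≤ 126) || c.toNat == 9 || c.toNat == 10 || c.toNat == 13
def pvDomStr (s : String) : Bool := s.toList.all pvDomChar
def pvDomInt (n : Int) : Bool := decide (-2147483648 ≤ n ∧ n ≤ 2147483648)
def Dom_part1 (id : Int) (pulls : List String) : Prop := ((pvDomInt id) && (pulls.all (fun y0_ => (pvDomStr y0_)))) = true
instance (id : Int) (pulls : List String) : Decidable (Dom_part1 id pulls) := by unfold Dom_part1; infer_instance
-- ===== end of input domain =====

-- B replaces A's per-token early-return validation by a one-pass per-colour maximum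
-- followed by a single check (objective: simpler decomposition, same cost).

-- ===== PORT A =====
-- p.split(', ') — the separator is nonempty, so Python's split never raises; split? is always some
def pvSegs (p : String) : List String := (PySem.Str.split? p ", ").getD []

-- inner loop 'for i in p.split(', '):' with its early returns (some 0 = 'return 0' fired)
def partAInner (rr gg bb : Int) : List String → Option Int
  | [] => none
  | i :: rest =>
    match PySem.Str.split₀ i with
    | [num, color] =>
      if color == "red" then
        if rr < (PySem.Int.ofStr? num).getD 0 then some 0 else partAInner rr gg bb rest
      else if color == "green" then
        if gg < (PySem.Int.ofStr? num).getD 0 then some 0 else partAInner rr gg bb rest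
      else if color == "blue" then
        if bb < (PySem.Int.ofStr? num).getD 0 then some 0 else partAInner rr gg bb rest
      else partAInner rr gg bb rest
    | _ => some 0  -- ValueError (unpack) in Python; unreachable under Pre_part1

-- outer loop 'for p in pulls:'
def partAOuter (rr gg bb : Int) : List String → Option Int
  | [] => none
  | p :: rest =>
    match partAInner rr gg bb (pvSegs p) with
    | some v => some v
    | none => partAOuter rr gg bb rest

def part1 (id : Int) (pulls : List String) : Int :=
  let rr : Int := 12
  let gg : Int := 13
  let bb : Int := 14
  match partAOuter rr gg bb pulls with
  | some v => v
  | none => id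

-- ===== PORT B =====
-- body of B's inner loop: update the running per-colour maxima (r, g, b)
def partBStep (acc : Int × Int × Int) (seg : String) : Int × Int × Int :=
  match PySem.Str.split₀ seg with
  | [num, color] =>
    if color == "red" then (max acc.1 ((PySem.Int.ofStr? num).getD 0), acc.2.1, acc.2.2)
    else if color == "green" then (acc.1, max acc.2.1 ((PySem.Int.ofStr? num).getD 0), acc.2.2)
    else if color == "blue" then (acc.1, acc.2.1, max acc.2.2 ((PySem.Int.ofStr? num).getD 0))
    else acc
  | _ => acc  -- ValueError (unpack) in Python; unreachable under Pre_part1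

def part1_alt (id : Int) (pulls : List String) : Int :=
  let acc := pulls.foldl (fun acc p => (pvSegs p).foldl partBStep acc) (0, 0, 0)
  if 12 < acc.1 ∨ 13 < acc.2.1 ∨ 14 < acc.2.2 then 0 else id

-- ===== PRECONDITION & SPEC =====
-- a segment is well-formed: seg.split() yields exactly two tokens, and for the three known
-- colours the count token parses as a Python int
def pvWfSeg (seg : String) : Bool :=
  match PySem.Str.split₀ seg with
  | [num, color] =>
    !(color == "red" || color == "green" || color == "blue") || (PySem.Int.ofStr? num).isSome
  | _ => false

-- Pre_ excludes exactly the inputs containing a malformed segment (Python ValueError: unpack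
-- or int()); A raises on most of them, but A can still return 0 when an over-limit count
-- precedes the malformed segment while B, which always scans everything, raises there.
def Pre_part1 (id : Int) (pulls : List String) : Prop :=
  (pulls.all (fun p => (pvSegs p).all pvWfSeg)) = true
instance (id : Int) (pulls : List String) : Decidable (Pre_part1 id pulls) := by
  unfold Pre_part1; infer_instance

def pvWitness_part1 : Int × List String := (3, ["1 red, 2 blue", "13 green, 5 purple"])

def Spec_part1 (id : Int) (pulls : List String) (out : Int) : Prop := out = part1_alt id pulls
instance (id : Int) (pulls : List String) (out : Int) : Decidable (Spec_part1 id pulls out) := by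
  unfold Spec_part1; infer_instance

-- ===== CLAIM (what is proved, stated in full; the proofs are below) =====
def Claim_equal_part1 : Prop := ∀ (id : Int) (pulls : List String), Dom_part1 id pulls → Pre_part1 id pulls → Spec_part1 id pulls (part1 id pulls)

-- ===== LEMMAS AND PROOFS =====

-- the maxima are within the limits
def pvOk (acc : Int × Int × Int) : Prop := acc.1 ≤ 12 ∧ acc.2.1 ≤ 13 ∧ acc.2.2 ≤ 14

theorem pvStep_mono (acc : Int × Int × Int) (s : String) :
    acc.1 ≤ (partBStep acc s).1 ∧ acc.2.1 ≤ (partBStep acc s).2.1 ∧ acc.2.2 ≤ (partBStep acc s).2.2 := by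
  unfold partBStep
  rcases h : PySem.Str.split₀ s with _ | ⟨num, _ | ⟨color, _ | _⟩⟩ <;> simp
  split_ifs <;> simp


theorem pvFold_mono (segs : List String) (acc : Int × Int × Int) :
    acc.1 ≤ (segs.foldl partBStep acc).1 ∧ acc.2.1 ≤ (segs.foldl partBStep acc).2.1 ∧
      acc.2.2 ≤ (segs.foldl partBStep acc).2.2 := by
  induction segs generalizing acc with
  | nil => simp
  | cons s rest ih =>
    have h1 := pvStep_mono acc s
    have h2 := ih (partBStep acc s)
    simp only [List.foldl_cons] at *
    omega

theorem pvOuter_mono (pulls : List String) (acc : Int × Int × Int) :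
    acc.1 ≤ (pulls.foldl (fun acc p => (pvSegs p).foldl partBStep acc) acc).1 ∧
    acc.2.1 ≤ (pulls.foldl (fun acc p => (pvSegs p).foldl partBStep acc) acc).2.1 ∧
    acc.2.2 ≤ (pulls.foldl (fun acc p => (pvSegs p).foldl partBStep acc) acc).2.2 := by
  induction pulls generalizing acc with
  | nil => simp
  | cons p rest ih =>
    have h1 := pvFold_mono (pvSegs p) acc
    have h2 := ih ((pvSegs p).foldl partBStep acc)
    simp only [List.foldl_cons] at *
    omega

theorem pvInner_lemma (segs : List String) (acc : Int × Int × Int)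
    (hwf : ∀ s ∈ segs, pvWfSeg s = true) (hok : pvOk acc) :
    (partAInner 12 13 14 segs = none → pvOk (segs.foldl partBStep acc)) ∧
    (∀ v, partAInner 12 13 14 segs = some v → v = 0 ∧ ¬ pvOk (segs.foldl partBStep acc)) := by
  induction segs generalizing acc with
  | nil => simp [partAInner, hok]
  | cons s rest ih =>
    have hws : pvWfSeg s = true := hwf s (by simp)
    have hwr : ∀ s' ∈ rest, pvWfSeg s' = true := fun s' hs' => hwf s' (by simp [hs'])
    unfold pvWfSeg at hws
    rcases h : PySem.Str.split₀ s with _ | ⟨num, _ | ⟨color, _ | _⟩⟩ <;>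
      rw [h] at hws <;> try simp at hws
    simp only [partAInner, List.foldl_cons, partBStep, h]
    rcases hok with ⟨hr, hg, hb⟩
    by_cases hred : color == "red"
    · simp only [hred, reduceIte]
      set n := (PySem.Int.ofStr? num).getD 0 with hn
      by_cases hgt : 12 < n
      · simp only [hgt, reduceIte]
        refine ⟨(by intro hc; cases hc), fun v hv => ⟨(by cases hv; rfl), ?_⟩⟩
        have := pvFold_mono rest (max acc.1 n, acc.2.1, acc.2.2)
        rintro ⟨h1, -, -⟩
        omega
      · simp only [hgt, reduceIte]
        exact ih (max acc.1 n, acc.2.1, acc.2.2) hwr ⟨by simp; omega, hg, hb⟩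
    · simp only [hred, Bool.false_eq_true, reduceIte]
      by_cases hgreen : color == "green"
      · simp only [hgreen, reduceIte]
        set n := (PySem.Int.ofStr? num).getD 0 with hn
        by_cases hgt : 13 < n
        · simp only [hgt, reduceIte]
          refine ⟨(by intro hc; cases hc), fun v hv => ⟨(by cases hv; rfl), ?_⟩⟩
          have := pvFold_mono rest (acc.1, max acc.2.1 n, acc.2.2)
          rintro ⟨-, h2, -⟩
          dsimp only at this
          omega
        · simp only [hgt, reduceIte]
          exact ih (acc.1, max acc.2.1 n, acc.2.2) hwr ⟨hr, by simp; omega, hb⟩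
      · simp only [hgreen, Bool.false_eq_true, reduceIte]
        by_cases hblue : color == "blue"
        · simp only [hblue, reduceIte]
          set n := (PySem.Int.ofStr? num).getD 0 with hn
          by_cases hgt : 14 < n
          · simp only [hgt, reduceIte]
            refine ⟨(by intro hc; cases hc), fun v hv => ⟨(by cases hv; rfl), ?_⟩⟩
            have := pvFold_mono rest (acc.1, acc.2.1, max acc.2.2 n)
            rintro ⟨-, -, h3⟩
            dsimp only at this
            omega
          · simp only [hgt, reduceIte]
            exact ih (acc.1, acc.2.1, max acc.2.2 n) hwr ⟨hr, hg, by simp; omega⟩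
        · simp only [hblue, Bool.false_eq_true, reduceIte]
          exact ih acc hwr ⟨hr, hg, hb⟩

theorem pvOuter_lemma (pulls : List String) (acc : Int × Int × Int)
    (hwf : ∀ p ∈ pulls, ∀ s ∈ pvSegs p, pvWfSeg s = true) (hok : pvOk acc) :
    (partAOuter 12 13 14 pulls = none →
      pvOk (pulls.foldl (fun acc p => (pvSegs p).foldl partBStep acc) acc)) ∧
    (∀ v, partAOuter 12 13 14 pulls = some v → v = 0 ∧
      ¬ pvOk (pulls.foldl (fun acc p => (pvSegs p).foldl partBStep acc) acc)) := by
  induction pulls generalizing acc with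
  | nil => simp [partAOuter, hok]
  | cons p rest ih =>
    have hwp := hwf p (by simp)
    have hwr : ∀ p' ∈ rest, ∀ s ∈ pvSegs p', pvWfSeg s = true :=
      fun p' hp' => hwf p' (by simp [hp'])
    have hin := pvInner_lemma (pvSegs p) acc hwp hok
    simp only [partAOuter, List.foldl_cons]
    rcases hA : partAInner 12 13 14 (pvSegs p) with _ | v
    · exact ih ((pvSegs p).foldl partBStep acc) hwr (hin.1 hA)
    · obtain ⟨hv0, hnok⟩ := hin.2 v hA
      refine ⟨(by intro hc; cases hc), fun w hw => ⟨(by cases hw; exact hv0), ?_⟩⟩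
      have hmono := pvOuter_mono rest ((pvSegs p).foldl partBStep acc)
      unfold pvOk at *
      omega

-- ===== VERDICT (by name: the statement is the Claim_ definition above) =====
theorem part1_spec : Claim_equal_part1 := by
  intro id pulls _ hpre
  unfold Spec_part1 part1 part1_alt
  have hwf : ∀ p ∈ pulls, ∀ s ∈ pvSegs p, pvWfSeg s = true := by
    intro p hp s hs
    unfold Pre_part1 at hpre
    simp only [List.all_eq_true] at hpre
    exact hpre p hp s hs
  have h := pvOuter_lemma pulls (0, 0, 0) hwf ⟨by norm_num, by norm_num, by norm_num⟩
  rcases hA : partAOuter 12 13 14 pulls with _ | v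
  · have hok := h.1 hA
    simp only [hA]
    rw [if_neg]
    unfold pvOk at hok
    omega
  · obtain ⟨hv0, hnok⟩ := h.2 v hA
    simp only [hA, hv0]
    rw [if_pos]
    unfold pvOk at hnok
    omega
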